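-- pv_equiv track=rewrite | github.com/bruno-g-galvan/Facu | EXTRAS/3.4.225 - INTRODUCCIÓN A LA ALGORITMIA/Guias practicas resueltas/tpfunciones.py | extraerDigito
-- ===== SOURCE A (Python) =====
-- def extraerDigito(numero, posicion):
--     if numero<0:
--         numero*=-1
--     contador=0
--
--     while numero>0:
--
--         ultNumero=numero%10
--
--         if contador==posicion:
--             return ultNumero
--
--         numero=numero//10
--         contador+=1
--     return -1
-- ===== SOURCE B (Python) =====
-- def extraerDigito(numero, posicion):
--     n = abs(numero)
--     # a digit at 'posicion' exists only if posicion < number of bits of n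
--     # (10**posicion > n then settles the exact decimal bound); the bit_length
--     # guard also keeps 10 ** posicion from being computed for absurd positions
--     if posicion < 0 or posicion >= n.bit_length() or 10 ** posicion > n:
--         return -1
--     return n // 10 ** posicion % 10
-- ===== Notes on version B (the rewrite author's own statement) =====
-- stated objective: simpler
-- what changed: Replaced the digit-peeling while loop and counter with a closed form: a validity guard (posicion in range, checked via bit_length and 10**posicion) and one division+modulo.
import Mathlib
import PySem

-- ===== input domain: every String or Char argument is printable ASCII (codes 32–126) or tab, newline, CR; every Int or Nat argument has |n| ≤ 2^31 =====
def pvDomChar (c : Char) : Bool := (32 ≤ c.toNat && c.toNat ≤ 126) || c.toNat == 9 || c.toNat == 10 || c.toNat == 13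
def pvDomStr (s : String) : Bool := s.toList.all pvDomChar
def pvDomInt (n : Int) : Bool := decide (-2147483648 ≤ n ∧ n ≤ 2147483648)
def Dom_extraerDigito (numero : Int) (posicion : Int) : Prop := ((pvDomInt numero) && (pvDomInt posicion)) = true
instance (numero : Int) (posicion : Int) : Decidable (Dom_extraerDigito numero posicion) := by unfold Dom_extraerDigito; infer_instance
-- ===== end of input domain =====

-- B replaces A's digit-peeling while loop by a closed-form power-of-ten test plus one division and modulo; same return value on all inputs.

-- ===== PORT A =====
-- the while loop of A: state (numero, contador)
def edLoop (numero : Int) (contador : Int) (posicion : Int) : Int :=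
  if _h : numero > 0 then
    let ultNumero := PySem.Int.mod numero 10
    if contador = posicion then ultNumero
    else edLoop (PySem.Int.floordiv numero 10) (contador + 1) posicion
  else -1
termination_by numero.toNat
decreasing_by
  rw [PySem.Int.floordiv_eq_ediv_of_pos (by omega)]
  omega

def extraerDigito (numero : Int) (posicion : Int) : Int :=
  let numero := if numero < 0 then numero * (-1) else numero
  edLoop numero 0 posicion

-- ===== PORT B =====
def extraerDigito_alt (numero : Int) (posicion : Int) : Int :=
  if posicion < 0 ∨ posicion ≥ (PySem.Int.bitLength |numero| : Int) ∨ (10 : Int) ^ posicion.toNat > |numero| then -1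
  else PySem.Int.mod (PySem.Int.floordiv |numero| ((10 : Int) ^ posicion.toNat)) 10

-- ===== PRECONDITION & SPEC =====
def Spec_extraerDigito (numero : Int) (posicion : Int) (out : Int) : Prop := out = extraerDigito_alt numero posicion
instance (numero : Int) (posicion : Int) (out : Int) : Decidable (Spec_extraerDigito numero posicion out) := by unfold Spec_extraerDigito; infer_instance

-- ===== CLAIM (what is proved, stated in full; the proofs are below) =====
def Claim_equal_extraerDigito : Prop := ∀ (numero : Int) (posicion : Int), Dom_extraerDigito numero posicion → Spec_extraerDigito numero posicion (extraerDigito numero posicion)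

-- ===== LEMMAS AND PROOFS =====

lemma lt_two_pow_bitLength (m : Nat) : (m : Int) < 2 ^ PySem.Int.bitLength (m : Int) := by
  induction m using Nat.strong_induction_on with
  | _ m ih =>
    by_cases hm : 0 < (m : Int)
    · rw [PySem.Int.bitLength_of_pos hm,
          show PySem.Int.floordiv (m : Int) 2 = ((m / 2 : Nat) : Int) by
            rw [PySem.Int.floordiv_eq_ediv_of_pos (by omega)]; exact (Int.natCast_div m 2).symm]
      have h2 := ih (m / 2) (by omega)
      have : ((m / 2 : Nat) : Int) + 1 ≤ 2 ^ PySem.Int.bitLength ((m / 2 : Nat) : Int) := by omega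
      calc (m : Int) ≤ 2 * ((m / 2 : Nat) : Int) + 1 := by
            have := Nat.div_add_mod m 2; have := Nat.mod_lt m (show 0 < 2 by omega); push_cast; omega
        _ < 2 ^ (PySem.Int.bitLength ((m / 2 : Nat) : Int) + 1) := by
            rw [pow_succ, mul_comm]; omega
    · have hm0 : m = 0 := by omega
      subst hm0
      decide

-- the bit-length disjunct in B's guard is redundant for the value: it is implied by 10 ^ p > n
lemma alt_eq (m : Nat) (p : Int) : extraerDigito_alt (m : Int) p =
    if p < 0 ∨ (10 : Int) ^ p.toNat > (m : Int) then -1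
    else PySem.Int.mod (PySem.Int.floordiv (m : Int) ((10 : Int) ^ p.toNat)) 10 := by
  unfold extraerDigito_alt
  rw [abs_of_nonneg (by positivity : (0:Int) ≤ (m : Int))]
  by_cases hp : p < 0
  · rw [if_pos (Or.inl hp), if_pos (Or.inl hp)]
  by_cases hbl : p ≥ (PySem.Int.bitLength (m : Int) : Int)
  · have hlt : (m : Int) < (10 : Int) ^ p.toNat := by
      calc (m : Int) < 2 ^ PySem.Int.bitLength (m : Int) := lt_two_pow_bitLength m
        _ ≤ 2 ^ p.toNat := by
            apply pow_le_pow_right₀ (by omega)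
            omega
        _ ≤ 10 ^ p.toNat := by
            apply pow_le_pow_left₀ (by omega) (by omega)
    rw [if_pos (Or.inr (Or.inl hbl)), if_pos (Or.inr hlt)]
  · by_cases hbig : (10 : Int) ^ p.toNat > (m : Int)
    · rw [if_pos (Or.inr (Or.inr hbig)), if_pos (Or.inr hbig)]
    · rw [if_neg (by tauto), if_neg (by tauto)]

lemma natCast_floordiv_ten (m : Nat) : PySem.Int.floordiv (m : Int) 10 = ((m / 10 : Nat) : Int) := by
  rw [PySem.Int.floordiv_eq_ediv_of_pos (by omega)]
  exact (Int.natCast_div m 10).symm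

-- one peeling step of the closed form: dropping the last digit and decrementing the position
lemma alt_step (m : Nat) (c p : Int) (hk : 0 < p - c) :
    extraerDigito_alt ((m / 10 : Nat) : Int) (p - (c + 1)) = extraerDigito_alt (m : Int) (p - c) := by
  rw [alt_eq, alt_eq]
  have hc10 : ((m / 10 : Nat) : Int) = (m : Int) / 10 := Int.natCast_div m 10
  have hk1 : (p - c).toNat = (p - (c + 1)).toNat + 1 := by omega
  set k := (p - (c + 1)).toNat with hkdef
  have hpow : (10 : Int) ^ (k + 1) = 10 ^ k * 10 := by ring
  have hcond : ((10 : Int) ^ k > (m : Int) / 10) ↔ ((10 : Int) ^ (k + 1) > (m : Int)) := by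
    rw [hpow, gt_iff_lt, gt_iff_lt, Int.ediv_lt_iff_lt_mul (show (0:Int) < 10 by omega)]
  rw [hk1, hc10]
  by_cases hbig : (10 : Int) ^ (k + 1) > (m : Int)
  · rw [if_pos (Or.inr (hcond.mpr hbig)), if_pos (Or.inr hbig)]
  · rw [if_neg (by rw [not_or, not_lt, not_lt]; exact ⟨by omega, not_lt.mp (fun h => hbig (hcond.mp h))⟩),
        if_neg (by rw [not_or, not_lt, not_lt]; exact ⟨by omega, not_lt.mp hbig⟩)]
    congr 1
    rw [PySem.Int.floordiv_eq_ediv_of_pos (by positivity),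
        PySem.Int.floordiv_eq_ediv_of_pos (by positivity),
        Int.ediv_ediv_of_nonneg (by omega : (0:Int) ≤ 10), hpow]
    congr 1
    ring

lemma edLoop_eq_alt (m : Nat) : ∀ (c p : Int), edLoop (m : Int) c p = extraerDigito_alt (m : Int) (p - c) := by
  induction m using Nat.strong_induction_on with
  | _ m ih =>
    intro c p
    rw [edLoop]
    by_cases hm : (m : Int) > 0
    · simp only [hm, dif_pos]
      by_cases hc : c = p
      · rw [if_pos hc]
        have hk0 : (p - c).toNat = 0 := by omega
        rw [alt_eq, hk0, pow_zero,
            if_neg (by rw [not_or, not_lt, not_lt]; exact ⟨by omega, by omega⟩),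
            PySem.Int.floordiv_eq_ediv_of_pos (by omega : (0:Int) < 1), Int.ediv_one]
      · rw [if_neg hc, natCast_floordiv_ten, ih (m / 10) (by omega) (c + 1) p]
        by_cases hneg : p - c < 0
        · have hneg1 : p - (c + 1) < 0 := by omega
          rw [alt_eq, alt_eq, if_pos (Or.inl hneg1), if_pos (Or.inl hneg)]
        · exact alt_step m c p (by omega)
    · rw [dif_neg hm]
      have hm0 : m = 0 := by omega
      subst hm0
      rw [alt_eq, if_pos (Or.inr (by simp only [Nat.cast_zero]; positivity))]

-- ===== VERDICT (by name: the statement is the Claim_ definition above) =====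
theorem extraerDigito_spec : Claim_equal_extraerDigito := by
  intro numero posicion _
  unfold Spec_extraerDigito extraerDigito
  have habs : (if numero < 0 then numero * (-1) else numero) = ((numero.natAbs : Nat) : Int) := by
    split <;> omega
  simp only [habs]
  rw [edLoop_eq_alt, sub_zero]
  have : |numero| = ((numero.natAbs : Nat) : Int) := by rw [Int.abs_eq_natAbs]
  unfold extraerDigito_alt
  rw [this, abs_of_nonneg (Int.natCast_nonneg _)]
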